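-- pv_equiv track=rewrite | github.com/belov-igor/recnik | scripts/import_wiktionary.py | tags_to_meta
-- ===== SOURCE A (Python) =====
-- GENDER_MAP = {
--     "masculine": "m",
--     "feminine": "f",
--     "neuter": "nt",
-- }
--
-- ASPECT_MAP = {
--     "imperfective": "impf",
--     "perfective": "perf",
-- }
--
-- def tags_to_meta(tags: list[str]) -> tuple[str, str]:
--     gender = "-"
--     aspect = "-"
--     for t in tags:
--         if t in GENDER_MAP and gender == "-":
--             gender = GENDER_MAP[t]
--         if t in ASPECT_MAP and aspect == "-":
--             aspect = ASPECT_MAP[t]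
--     return gender, aspect
-- ===== SOURCE B (Python) =====
-- GENDER_MAP = {
--     "masculine": "m",
--     "feminine": "f",
--     "neuter": "nt",
-- }
--
-- ASPECT_MAP = {
--     "imperfective": "impf",
--     "perfective": "perf",
-- }
--
-- def _earliest(mapping, tags):
--     # Invert the traversal: scan the (few) map entries, locate each key's first
--     # occurrence in tags with list.index, and keep the value of the key whose
--     # occurrence index is smallest.
--     best_i = None
--     best_v = "-"
--     for key, val in mapping.items():
--         try:
--             i = tags.index(key)
--         except ValueError:
--             continue
--         if best_i is None or i < best_i:
--             best_i, best_v = i, val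
--     return best_v
--
-- def tags_to_meta(tags: list[str]) -> tuple[str, str]:
--     return _earliest(GENDER_MAP, tags), _earliest(ASPECT_MAP, tags)
-- ===== Notes on version B (the rewrite author's own statement) =====
-- stated objective: alternative
-- what changed: B inverts the traversal: instead of A's single fused scan over the tags with '-' guards, it iterates over each map's entries, finds each key's first occurrence in tags with list.index, and returns the value of the key with the smallest occurrence index (min-index selection).
import Mathlib
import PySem

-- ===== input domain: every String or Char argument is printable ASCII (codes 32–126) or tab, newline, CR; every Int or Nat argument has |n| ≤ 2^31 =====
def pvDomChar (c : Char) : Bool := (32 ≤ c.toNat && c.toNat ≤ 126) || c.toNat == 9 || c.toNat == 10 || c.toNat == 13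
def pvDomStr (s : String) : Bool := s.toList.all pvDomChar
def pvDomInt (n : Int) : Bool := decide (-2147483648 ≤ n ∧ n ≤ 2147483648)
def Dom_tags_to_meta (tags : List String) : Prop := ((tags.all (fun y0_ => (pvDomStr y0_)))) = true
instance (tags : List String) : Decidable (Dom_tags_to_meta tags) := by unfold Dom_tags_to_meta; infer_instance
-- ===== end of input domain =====

-- B inverts the traversal: instead of A's single fused scan over the tags with
-- '== "-"' guards, it scans each map's (few) entries, finds every key's first
-- occurrence in tags with list.index, and keeps the value at the smallest index.

-- ===== PORT A =====
def GENDER_MAP : PySem.Dict String String :=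
  PySem.Dict.ofList [("masculine", "m"), ("feminine", "f"), ("neuter", "nt")]

def ASPECT_MAP : PySem.Dict String String :=
  PySem.Dict.ofList [("imperfective", "impf"), ("perfective", "perf")]

def tags_to_meta (tags : List String) : String × String :=
  tags.foldl (fun st t =>
    let st1 :=
      if GENDER_MAP.contains t ∧ st.1 = "-" then (GENDER_MAP.getD t st.1, st.2) else st
    if ASPECT_MAP.contains t ∧ st1.2 = "-" then (st1.1, ASPECT_MAP.getD t st1.2) else st1)
    ("-", "-")

-- ===== PORT B =====
-- loop body of _earliest: tags.index(key) → PySem.List.index? (none = ValueError, 'continue')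
def bstep (tags : List String) (st : Option Nat × String) (kv : String × String) :
    Option Nat × String :=
  match PySem.List.index? tags kv.1 with
  | none => st
  | some i =>
    match st.1 with
    | none => (some i, kv.2)
    | some j => if i < j then (some i, kv.2) else st

def earliest (mapping : PySem.Dict String String) (tags : List String) : String :=
  (mapping.items.foldl (bstep tags) ((none : Option Nat), "-")).2

def tags_to_meta_alt (tags : List String) : String × String :=
  (earliest GENDER_MAP tags, earliest ASPECT_MAP tags)

-- ===== PRECONDITION & SPEC =====
def Spec_tags_to_meta (tags : List String) (out : String × String) : Prop := out = tags_to_meta_alt tags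
instance (tags : List String) (out : String × String) : Decidable (Spec_tags_to_meta tags out) := by unfold Spec_tags_to_meta; infer_instance

-- ===== CLAIM (what is proved, stated in full; the proofs are below) =====
def Claim_equal_tags_to_meta : Prop := ∀ (tags : List String), Dom_tags_to_meta tags → Spec_tags_to_meta tags (tags_to_meta tags)

-- ===== LEMMAS AND PROOFS =====

lemma GM_mk : GENDER_MAP = PySem.Dict.mk [("masculine", "m"), ("feminine", "f"), ("neuter", "nt")] := by decide

lemma AM_mk : ASPECT_MAP = PySem.Dict.mk [("imperfective", "impf"), ("perfective", "perf")] := by decide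

-- no map value is "-"
lemma gender_ne_dash (t v : String) (h : GENDER_MAP.get? t = some v) : v ≠ "-" := by
  rw [GM_mk] at h
  simp only [PySem.Dict.get?_mk_cons] at h
  split_ifs at h <;> simp_all [PySem.Dict.get?] <;> intro hv <;> subst hv <;> simp_all

lemma aspect_ne_dash (t v : String) (h : ASPECT_MAP.get? t = some v) : v ≠ "-" := by
  rw [AM_mk] at h
  simp only [PySem.Dict.get?_mk_cons] at h
  split_ifs at h <;> simp_all [PySem.Dict.get?] <;> intro hv <;> subst hv <;> simp_all

-- one step of A's fused loop, in closed form
lemma step_char (t g a : String) :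
    (let st1 :=
       if GENDER_MAP.contains t ∧ g = "-" then (GENDER_MAP.getD t g, a) else (g, a)
     if ASPECT_MAP.contains t ∧ st1.2 = "-" then (st1.1, ASPECT_MAP.getD t st1.2) else st1)
    = ((if g = "-" then (GENDER_MAP.get? t).getD g else g),
       (if a = "-" then (ASPECT_MAP.get? t).getD a else a)) := by
  have hcg : GENDER_MAP.contains t = (GENDER_MAP.get? t).isSome :=
    PySem.Dict.contains_eq_isSome_get? _ _
  have hca : ASPECT_MAP.contains t = (ASPECT_MAP.get? t).isSome :=
    PySem.Dict.contains_eq_isSome_get? _ _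
  have hgd : GENDER_MAP.getD t g = (GENDER_MAP.get? t).getD g :=
    PySem.Dict.getD_eq_get?_getD _ _ _
  have had : ASPECT_MAP.getD t a = (ASPECT_MAP.get? t).getD a :=
    PySem.Dict.getD_eq_get?_getD _ _ _
  cases hG : GENDER_MAP.get? t <;> cases hA : ASPECT_MAP.get? t <;>
    by_cases hg : g = "-" <;> by_cases ha : a = "-" <;>
      simp_all

lemma loop_char (tags : List String) (g a : String)
    (hg : g = "-" ∨ ∃ u, GENDER_MAP.get? u = some g)
    (ha : a = "-" ∨ ∃ u, ASPECT_MAP.get? u = some a) :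
    tags.foldl (fun st t =>
      let st1 :=
        if GENDER_MAP.contains t ∧ st.1 = "-" then (GENDER_MAP.getD t st.1, st.2) else st
      if ASPECT_MAP.contains t ∧ st1.2 = "-" then (st1.1, ASPECT_MAP.getD t st1.2) else st1)
      (g, a)
    = ((if g = "-" then (tags.findSome? (fun t => GENDER_MAP.get? t)).getD "-" else g),
       (if a = "-" then (tags.findSome? (fun t => ASPECT_MAP.get? t)).getD "-" else a)) := by
  induction tags generalizing g a with
  | nil => simp
  | cons t ts ih =>
    rw [List.foldl_cons, step_char t g a]
    have hg1inv : (if g = "-" then (GENDER_MAP.get? t).getD g else g) = "-" ∨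
        ∃ u, GENDER_MAP.get? u = some (if g = "-" then (GENDER_MAP.get? t).getD g else g) := by
      split_ifs with h
      · cases hG : GENDER_MAP.get? t with
        | none => exact Or.inl (by simp [h])
        | some v => exact Or.inr ⟨t, by simp [hG]⟩
      · exact hg
    have ha1inv : (if a = "-" then (ASPECT_MAP.get? t).getD a else a) = "-" ∨
        ∃ u, ASPECT_MAP.get? u = some (if a = "-" then (ASPECT_MAP.get? t).getD a else a) := by
      split_ifs with h
      · cases hA : ASPECT_MAP.get? t with
        | none => exact Or.inl (by simp [h])
        | some v => exact Or.inr ⟨t, by simp [hA]⟩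
      · exact ha
    rw [ih _ _ hg1inv ha1inv]
    refine Prod.ext ?_ ?_
    · by_cases h : g = "-"
      · cases hG : GENDER_MAP.get? t with
        | none => simp [h, hG]
        | some v =>
          have hv := gender_ne_dash t v hG
          simp [h, hG, hv]
      · simp [h]
    · by_cases h : a = "-"
      · cases hA : ASPECT_MAP.get? t with
        | none => simp [h, hA]
        | some v =>
          have hv := aspect_ne_dash t v hA
          simp [h, hA, hv]
      · simp [h]

-- B side: if t matches no key of items, prepending t shifts every index by one
-- and the fold's state shifts along with it.
lemma shift_run (t : String) (ts : List String) (items : List (String × String))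
    (hk : ∀ kv ∈ items, kv.1 ≠ t) (st : Option Nat × String) :
    items.foldl (bstep (t :: ts)) (st.1.map (· + 1), st.2)
    = ((items.foldl (bstep ts) st).1.map (· + 1), (items.foldl (bstep ts) st).2) := by
  induction items generalizing st with
  | nil => simp
  | cons kv rest ih =>
    have hkv : kv.1 ≠ t := hk kv (by simp)
    have hrest : ∀ kv' ∈ rest, kv'.1 ≠ t := fun kv' h => hk kv' (by simp [h])
    have hstep : bstep (t :: ts) (st.1.map (· + 1), st.2) kv
        = ((bstep ts st kv).1.map (· + 1), (bstep ts st kv).2) := by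
      rw [bstep, bstep, PySem.List.index?_cons_of_ne ts (Ne.symm hkv)]
      cases hI : PySem.List.index? ts kv.1 with
      | none => simp
      | some i =>
        cases hst : st.1 with
        | none => simp
        | some j =>
          by_cases hij : i < j <;> simp [hij, hst]
    rw [List.foldl_cons, List.foldl_cons, hstep, ih hrest]

lemma GM_items : GENDER_MAP.items = [("masculine", "m"), ("feminine", "f"), ("neuter", "nt")] := by decide

lemma AM_items : ASPECT_MAP.items = [("imperfective", "impf"), ("perfective", "perf")] := by decide

lemma earliest_G (tags : List String) :
    earliest GENDER_MAP tags = (tags.findSome? (fun t => GENDER_MAP.get? t)).getD "-" := by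
  induction tags with
  | nil => decide
  | cons t ts ih =>
    by_cases h1 : t = "masculine"
    · subst h1
      rw [earliest, GM_items]
      simp only [List.foldl_cons, List.foldl_nil, bstep,
        PySem.List.index?_cons_self,
        PySem.List.index?_cons_of_ne ts (show ("masculine" : String) ≠ "feminine" by decide),
        PySem.List.index?_cons_of_ne ts (show ("masculine" : String) ≠ "neuter" by decide)]
      cases hF : PySem.List.index? ts "feminine" <;>
        cases hN : PySem.List.index? ts "neuter" <;>
          simp [show GENDER_MAP.get? "masculine" = some "m" by decide]
    · by_cases h2 : t = "feminine"
      · subst h2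
        rw [earliest, GM_items]
        simp only [List.foldl_cons, List.foldl_nil, bstep,
          PySem.List.index?_cons_self,
          PySem.List.index?_cons_of_ne ts (show ("feminine" : String) ≠ "masculine" by decide),
          PySem.List.index?_cons_of_ne ts (show ("feminine" : String) ≠ "neuter" by decide)]
        cases hM : PySem.List.index? ts "masculine" <;>
          cases hN : PySem.List.index? ts "neuter" <;>
            simp [show GENDER_MAP.get? "feminine" = some "f" by decide]
      · by_cases h3 : t = "neuter"
        · subst h3
          rw [earliest, GM_items]
          simp only [List.foldl_cons, List.foldl_nil, bstep,
            PySem.List.index?_cons_self,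
            PySem.List.index?_cons_of_ne ts (show ("neuter" : String) ≠ "masculine" by decide),
            PySem.List.index?_cons_of_ne ts (show ("neuter" : String) ≠ "feminine" by decide)]
          cases hM : PySem.List.index? ts "masculine" <;>
            cases hF : PySem.List.index? ts "feminine" <;>
              (simp [show GENDER_MAP.get? "neuter" = some "nt" by decide];
                try (split_ifs <;> simp))
        · have hkeys : ∀ kv ∈ GENDER_MAP.items, kv.1 ≠ t := by
            rw [GM_items]; intro kv hkv
            simp only [List.mem_cons, List.not_mem_nil, or_false] at hkv
            rcases hkv with h | h | h <;> subst h <;> simpa [eq_comm] using ‹_›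
          have hget : GENDER_MAP.get? t = none := by
            rw [GM_mk]
            simp only [PySem.Dict.get?_mk_cons, beq_iff_eq]
            rw [if_neg (fun h => h1 h.symm), if_neg (fun h => h2 h.symm),
              if_neg (fun h => h3 h.symm)]
            simp [PySem.Dict.get?]
          have := shift_run t ts GENDER_MAP.items hkeys ((none : Option Nat), "-")
          simp only [Option.map_none] at this
          rw [earliest, this, List.findSome?_cons, hget, ← ih, earliest]

lemma earliest_A (tags : List String) :
    earliest ASPECT_MAP tags = (tags.findSome? (fun t => ASPECT_MAP.get? t)).getD "-" := by
  induction tags with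
  | nil => decide
  | cons t ts ih =>
    by_cases h1 : t = "imperfective"
    · subst h1
      rw [earliest, AM_items]
      simp only [List.foldl_cons, List.foldl_nil, bstep,
        PySem.List.index?_cons_self,
        PySem.List.index?_cons_of_ne ts (show ("imperfective" : String) ≠ "perfective" by decide)]
      cases hP : PySem.List.index? ts "perfective" <;>
        simp [show ASPECT_MAP.get? "imperfective" = some "impf" by decide]
    · by_cases h2 : t = "perfective"
      · subst h2
        rw [earliest, AM_items]
        simp only [List.foldl_cons, List.foldl_nil, bstep,
          PySem.List.index?_cons_self,
          PySem.List.index?_cons_of_ne ts (show ("perfective" : String) ≠ "imperfective" by decide)]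
        cases hI : PySem.List.index? ts "imperfective" <;>
          simp [show ASPECT_MAP.get? "perfective" = some "perf" by decide]
      · have hkeys : ∀ kv ∈ ASPECT_MAP.items, kv.1 ≠ t := by
          rw [AM_items]; intro kv hkv
          simp only [List.mem_cons, List.not_mem_nil, or_false] at hkv
          rcases hkv with h | h <;> subst h <;> simpa [eq_comm] using ‹_›
        have hget : ASPECT_MAP.get? t = none := by
          rw [AM_mk]
          simp only [PySem.Dict.get?_mk_cons, beq_iff_eq]
          rw [if_neg (fun h => h1 h.symm), if_neg (fun h => h2 h.symm)]
          simp [PySem.Dict.get?]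
        have := shift_run t ts ASPECT_MAP.items hkeys ((none : Option Nat), "-")
        simp only [Option.map_none] at this
        rw [earliest, this, List.findSome?_cons, hget, ← ih, earliest]

-- ===== VERDICT (by name: the statement is the Claim_ definition above) =====
theorem tags_to_meta_spec : Claim_equal_tags_to_meta := by
  intro tags _
  unfold Spec_tags_to_meta tags_to_meta tags_to_meta_alt
  rw [loop_char tags "-" "-" (Or.inl rfl) (Or.inl rfl), earliest_G, earliest_A]
  simp
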